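-- pv_equiv track=rewrite | github.com/jinho-kwak/smart_mirror | app/route_vaccine.py | count
-- ===== SOURCE A (Python) =====
-- from collections import Counter, defaultdict
--
-- def count(column_name : str, detection_result : list):
--     pick_label = list(map(lambda x : x[2], detection_result))
--     refined_dict = dict(Counter(pick_label))
--     result = {column_name : {}}
--     total_cnt = 0
--     for i in refined_dict.keys():
--         value = refined_dict[i]
--         if i.split('_')[-1] == 'case':
--             name = 'case'
--             cnt = value * 10
--         elif i.split('_')[-1] == 'halfcase':
--             name = 'halfcase'
--             cnt = value * 5
--         elif i.split('_')[-1] == 'box':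
--             name = 'box'
--             cnt = value * 1
--         else:
--             name = 'piece'
--             cnt = value * 1
--         total_cnt += cnt
--         if name in result[column_name]:
--             value = result[column_name][name] + value
--         result[column_name][name] = value
--     result[column_name]['total_cnt'] = total_cnt
--     #result[column_name] = dict(result[column_name])
--     return result
-- ===== SOURCE B (Python) =====
-- WEIGHT = {'case': 10, 'halfcase': 5, 'box': 1}
--
-- def count(column_name : str, detection_result : list):
--     counts = {}
--     total_cnt = 0
--     for row in detection_result:
--         suffix = row[2].split('_')[-1]
--         name = suffix if suffix in WEIGHT else 'piece'
--         counts[name] = counts.get(name, 0) + 1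
--         total_cnt += WEIGHT.get(name, 1)
--     counts['total_cnt'] = total_cnt
--     return {column_name: counts}
-- ===== Notes on version B (the rewrite author's own statement) =====
-- stated objective: simpler
-- what changed: B replaces A's two-phase Counter-then-merge (build a label Counter, then loop over distinct labels re-splitting each and merging counts by category with an explicit 'if name in result' branch) by one direct pass over the rows that increments the category count and the weighted total per row, with the weights in one small dict.
import Mathlib
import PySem

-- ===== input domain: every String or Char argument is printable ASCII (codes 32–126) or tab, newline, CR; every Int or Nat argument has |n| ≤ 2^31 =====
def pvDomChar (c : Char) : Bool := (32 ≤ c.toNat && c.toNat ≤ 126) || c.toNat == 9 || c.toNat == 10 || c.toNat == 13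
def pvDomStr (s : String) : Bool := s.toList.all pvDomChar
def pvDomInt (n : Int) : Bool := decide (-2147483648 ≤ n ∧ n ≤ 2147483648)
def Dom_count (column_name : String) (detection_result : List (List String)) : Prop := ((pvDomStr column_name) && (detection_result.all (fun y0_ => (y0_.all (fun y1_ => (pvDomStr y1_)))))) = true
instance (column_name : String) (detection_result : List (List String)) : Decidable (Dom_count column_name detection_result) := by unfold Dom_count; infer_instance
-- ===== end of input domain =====

-- B replaces A's Counter-then-merge two-phase aggregation by one direct pass over the rows (simpler decomposition, same results).

-- ===== PORT A =====
-- body of A's 'for i in refined_dict.keys()' loop (state: the inner result dict and total_cnt)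
def pvStepA (refined_dict : PySem.Dict String Int) (st : PySem.Dict String Int × Int) (i : String) : PySem.Dict String Int × Int :=
  let value := refined_dict.getD i 0
  let nc : String × Int :=
    if (PySem.List.pyGet? ((PySem.Str.split? i "_").getD []) (-1)).getD "" == "case" then ("case", value * 10)
    else if (PySem.List.pyGet? ((PySem.Str.split? i "_").getD []) (-1)).getD "" == "halfcase" then ("halfcase", value * 5)
    else if (PySem.List.pyGet? ((PySem.Str.split? i "_").getD []) (-1)).getD "" == "box" then ("box", value * 1)
    else ("piece", value * 1)
  let total_cnt := st.2 + nc.2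
  let value2 := if st.1.contains nc.1 then st.1.getD nc.1 0 + value else value
  (st.1.insert nc.1 value2, total_cnt)

def count (column_name : String) (detection_result : List (List String)) : List (String × List (String × Int)) :=
  let pick_label := detection_result.map (fun x => (PySem.List.pyGet? x 2).getD "")
  let refined_dict : PySem.Dict String Int := PySem.Dict.counter pick_label
  let st := refined_dict.keys.foldl (pvStepA refined_dict) (PySem.Dict.empty, 0)
  [(column_name, (st.1.insert "total_cnt" st.2).items)]

-- ===== PORT B =====
def pvWeight : PySem.Dict String Int := PySem.Dict.ofList [("case", 10), ("halfcase", 5), ("box", 1)]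

-- body of B's single 'for row in detection_result' loop
def pvStepB (st : PySem.Dict String Int × Int) (row : List String) : PySem.Dict String Int × Int :=
  let suffix := (PySem.List.pyGet? ((PySem.Str.split? ((PySem.List.pyGet? row 2).getD "") "_").getD []) (-1)).getD ""
  let name := if pvWeight.contains suffix then suffix else "piece"
  (st.1.insert name (st.1.getD name 0 + 1), st.2 + pvWeight.getD name 1)

def count_alt (column_name : String) (detection_result : List (List String)) : List (String × List (String × Int)) :=
  let st := detection_result.foldl pvStepB (PySem.Dict.empty, 0)
  [(column_name, (st.1.insert "total_cnt" st.2).items)]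

-- ===== PRECONDITION & SPEC =====
-- Pre_count excludes rows with fewer than 3 entries, on which A raises IndexError at row[2].
def Pre_count (column_name : String) (detection_result : List (List String)) : Prop :=
  ∀ row ∈ detection_result, 3 ≤ row.length
instance (column_name : String) (detection_result : List (List String)) : Decidable (Pre_count column_name detection_result) := by unfold Pre_count; infer_instance
def pvWitness_count : String × List (List String) := ("vaccine", [["0", "1", "a_case"], ["0", "2", "pill"]])

def Spec_count (column_name : String) (detection_result : List (List String)) (out : List (String × List (String × Int))) : Prop := out = count_alt column_name detection_result
instance (column_name : String) (detection_result : List (List String)) (out : List (String × List (String × Int))) : Decidable (Spec_count column_name detection_result out) := by unfold Spec_count; infer_instance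

-- ===== CLAIM (what is proved, stated in full; the proofs are below) =====
def Claim_equal_count : Prop := ∀ (column_name : String) (detection_result : List (List String)), Dom_count column_name detection_result → Pre_count column_name detection_result → Spec_count column_name detection_result (count column_name detection_result)

-- ===== LEMMAS AND PROOFS =====

-- the category a label is counted under, and its weight (shared characterisation of both ports' branch logic)
def pvName (i : String) : String :=
  let suffix := (PySem.List.pyGet? ((PySem.Str.split? i "_").getD []) (-1)).getD ""
  if suffix == "case" then "case"
  else if suffix == "halfcase" then "halfcase"
  else if suffix == "box" then "box"
  else "piece"

def pvWt (i : String) : Int :=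
  if pvName i = "case" then 10 else if pvName i = "halfcase" then 5 else 1

theorem pv_contains_weight (s : String) :
    pvWeight.contains s = (s == "case" || s == "halfcase" || s == "box") := by
  have : pvWeight = PySem.Dict.mk [("case", 10), ("halfcase", 5), ("box", 1)] := by
    apply PySem.Dict.ext; decide
  rw [this, PySem.Dict.contains_mk]
  simp only [List.any_cons, List.any_nil, Bool.or_false, BEq.comm, Bool.or_assoc]

-- A's 'if name in result' merge is an unconditional add (missing keys read as 0)
theorem pv_value2 (d : PySem.Dict String Int) (n : String) (v : Int) :
    (if d.contains n then d.getD n 0 + v else v) = d.getD n 0 + v := by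
  by_cases hc : d.contains n
  · simp [hc]
  · rw [if_neg (by simp [hc]), PySem.Dict.getD_of_not_contains _ 0 (by simpa using hc), zero_add]

-- A's if-chain branch, expressed through pvName/pvWt
theorem pv_stepA_eq (ls : List String) :
    pvStepA (PySem.Dict.counter ls)
      = fun (st : PySem.Dict String Int × Int) i =>
          (st.1.insert (pvName i) (st.1.getD (pvName i) 0 + (List.count i ls : Int)),
           st.2 + (List.count i ls : Int) * pvWt i) := by
  funext st i
  simp only [pvStepA, PySem.Dict.getD_counter, pvWt, pvName]
  set s := (PySem.List.pyGet? ((PySem.Str.split? i "_").getD []) (-1)).getD "" with hs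
  by_cases h1 : s = "case" <;> by_cases h2 : s = "halfcase" <;> by_cases h3 : s = "box" <;>
    simp_all <;> rw [pv_value2]

-- B's loop body, expressed through pvName/pvWt of the row's label
theorem pv_stepB_eq :
    pvStepB = fun (st : PySem.Dict String Int × Int) row =>
      (st.1.insert (pvName ((PySem.List.pyGet? row 2).getD ""))
         (st.1.getD (pvName ((PySem.List.pyGet? row 2).getD "")) 0 + 1),
       st.2 + pvWt ((PySem.List.pyGet? row 2).getD "")) := by
  funext st row
  simp only [pvStepB]
  set i := (PySem.List.pyGet? row 2).getD "" with hi
  have hname : (if pvWeight.contains ((PySem.List.pyGet? ((PySem.Str.split? i "_").getD []) (-1)).getD "")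
      then (PySem.List.pyGet? ((PySem.Str.split? i "_").getD []) (-1)).getD "" else "piece") = pvName i := by
    rw [pv_contains_weight, pvName]
    set s := (PySem.List.pyGet? ((PySem.Str.split? i "_").getD []) (-1)).getD ""
    by_cases h1 : s = "case" <;> by_cases h2 : s = "halfcase" <;> by_cases h3 : s = "box" <;> simp_all
  rw [hname]
  have hwt : pvWeight.getD (pvName i) 1 = pvWt i := by
    rw [pvWt, pvName]
    set s := (PySem.List.pyGet? ((PySem.Str.split? i "_").getD []) (-1)).getD ""
    by_cases h1 : s = "case" <;> by_cases h2 : s = "halfcase" <;> by_cases h3 : s = "box" <;>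
      simp_all <;> decide
  rw [hwt]

theorem pv_sum_spike {α : Type} [DecidableEq α] (S : List α) (hS : S.Nodup) (x : α) (g : α → Int) :
    (S.map (fun i => if i = x then g i else 0)).sum = if x ∈ S then g x else 0 := by
  induction S with
  | nil => simp
  | cons a t ih =>
    simp only [List.map_cons, List.sum_cons, List.mem_cons]
    rcases List.nodup_cons.mp hS with ⟨ha, ht⟩
    by_cases hax : a = x
    · subst hax; simp [ha, ih ht]
    · have : ¬ x = a := fun h => hax h.symm
      simp [hax, this, ih ht]

-- getD of a weighted insert-accumulate fold
theorem pv_getD_foldl_insert_add {α : Type} (qs : List α) (f : α → String) (w : α → Int)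
    (d : PySem.Dict String Int) (v : String) :
    (qs.foldl (fun d i => d.insert (f i) (d.getD (f i) 0 + w i)) d).getD v 0
      = d.getD v 0 + ((qs.filter (fun i => f i == v)).map w).sum := by
  induction qs generalizing d with
  | nil => simp
  | cons q t ih =>
    simp only [List.foldl_cons, List.filter_cons]
    rw [ih]
    by_cases h : f q = v
    · simp [h]
      ring
    · simp [h, PySem.Dict.getD_insert, Ne.symm h]

-- dedup commutes with mapping before dedup
theorem pv_ofList_map_ofList {α β : Type} [DecidableEq α] [DecidableEq β] (xs : List α) (f : α → β) :
    PySem.Set.ofList ((PySem.Set.ofList xs).map f) = PySem.Set.ofList (xs.map f) := by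
  induction xs using List.reverseRecOn with
  | nil => rfl
  | append_singleton t x ih =>
    rw [PySem.Set.ofList_append_singleton, List.map_append, List.map_singleton,
        PySem.Set.ofList_append_singleton]
    by_cases hx : x ∈ t
    · rw [PySem.Set.add_of_mem ((PySem.Set.mem_ofList t x).mpr hx), ih,
          PySem.Set.add_of_mem]
      rw [PySem.Set.mem_ofList]
      exact List.mem_map_of_mem hx
    · rw [PySem.Set.add_of_not_mem (fun h => hx ((PySem.Set.mem_ofList t x).mp h)),
          List.map_append, List.map_singleton, PySem.Set.ofList_append_singleton, ih]

-- per-category totals: grouped-by-label counting equals per-row counting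
theorem pv_count_sum {α : Type} [DecidableEq α] (xs : List α) (f : α → String) (v : String) :
    (((PySem.Set.ofList xs).filter (fun i => f i == v)).map (fun i => (List.count i xs : Int))).sum
      = (xs.countP (fun i => f i == v) : Int) := by
  induction xs using List.reverseRecOn with
  | nil => rfl
  | append_singleton t x ih =>
    rw [PySem.Set.ofList_append_singleton, List.countP_append]
    have hcnt : ∀ i, (List.count i (t ++ [x]) : Int) = (List.count i t : Int) + (if i = x then 1 else 0) := by
      intro i
      rw [List.count_append, List.count_singleton]
      by_cases h : i = x
      · subst h; simp
      · simp [h, beq_eq_false_iff_ne.mpr (Ne.symm h)]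
    by_cases hx : x ∈ t
    · rw [PySem.Set.add_of_mem ((PySem.Set.mem_ofList t x).mpr hx)]
      have : ((((PySem.Set.ofList t).filter (fun i => f i == v)).map (fun i => (List.count i (t ++ [x]) : Int))).sum)
          = (((PySem.Set.ofList t).filter (fun i => f i == v)).map (fun i => (List.count i t : Int))).sum
            + (((PySem.Set.ofList t).filter (fun i => f i == v)).map (fun i => if i = x then (1:Int) else 0)).sum := by
        rw [← PySem.List.sum_map_add_int]
        exact congrArg _ (List.map_congr_left (fun i _ => hcnt i))
      rw [this, ih, pv_sum_spike _ ((PySem.Set.nodup_ofList t).filter _) x]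
      have hmem : x ∈ (PySem.Set.ofList t).filter (fun i => f i == v) ↔ (f x == v) = true := by
        simp [List.mem_filter, (PySem.Set.mem_ofList t x).mpr hx]
      by_cases hfx : f x = v
      · simp [hfx, hmem]
      · simp [hfx, hmem]
    · rw [PySem.Set.add_of_not_mem (fun h => hx ((PySem.Set.mem_ofList t x).mp h)),
          List.filter_append]
      have h1 : (((PySem.Set.ofList t).filter (fun i => f i == v)).map (fun i => (List.count i (t ++ [x]) : Int)))
          = (((PySem.Set.ofList t).filter (fun i => f i == v)).map (fun i => (List.count i t : Int))) := by
        apply List.map_congr_left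
        intro i hi
        have hit : i ∈ t := (PySem.Set.mem_ofList t i).mp (List.mem_of_mem_filter hi)
        have : i ≠ x := fun h => hx (h ▸ hit)
        rw [hcnt i]; simp [this]
      by_cases hfx : f x = v
      · simp only [List.filter_singleton]
        rw [List.map_append, List.sum_append, h1, ih]
        simp [hfx, List.count_eq_zero_of_not_mem hx]
      · simp only [List.filter_singleton]
        rw [List.map_append, List.sum_append, h1, ih]
        have hb : (f x == v) = false := beq_eq_false_iff_ne.mpr hfx
        simp [hb]

-- grand total: grouped weighted sum equals per-row weighted sum
theorem pv_total_sum {α : Type} [DecidableEq α] (xs : List α) (g : α → Int) :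
    ((PySem.Set.ofList xs).map (fun i => (List.count i xs : Int) * g i)).sum = (xs.map g).sum := by
  induction xs using List.reverseRecOn with
  | nil => rfl
  | append_singleton t x ih =>
    rw [PySem.Set.ofList_append_singleton, List.map_append, List.map_singleton, List.sum_append]
    have hcnt : ∀ i, (List.count i (t ++ [x]) : Int) = (List.count i t : Int) + (if i = x then 1 else 0) := by
      intro i
      rw [List.count_append, List.count_singleton]
      by_cases h : i = x
      · subst h; simp
      · simp [h, beq_eq_false_iff_ne.mpr (Ne.symm h)]
    by_cases hx : x ∈ t
    · rw [PySem.Set.add_of_mem ((PySem.Set.mem_ofList t x).mpr hx)]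
      have : ((PySem.Set.ofList t).map (fun i => (List.count i (t ++ [x]) : Int) * g i)).sum
          = ((PySem.Set.ofList t).map (fun i => (List.count i t : Int) * g i)).sum
            + ((PySem.Set.ofList t).map (fun i => if i = x then g i else 0)).sum := by
        rw [← PySem.List.sum_map_add_int]
        apply congrArg
        apply List.map_congr_left
        intro i _
        rw [hcnt i]
        by_cases h : i = x
        · simp [h]; ring
        · simp [h]
      rw [this, ih, pv_sum_spike _ (PySem.Set.nodup_ofList t) x]
      simp [(PySem.Set.mem_ofList t x).mpr hx]
    · rw [PySem.Set.add_of_not_mem (fun h => hx ((PySem.Set.mem_ofList t x).mp h)),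
          List.map_append, List.map_singleton, List.sum_append]
      have h1 : ((PySem.Set.ofList t).map (fun i => (List.count i (t ++ [x]) : Int) * g i))
          = ((PySem.Set.ofList t).map (fun i => (List.count i t : Int) * g i)) := by
        apply List.map_congr_left
        intro i hi
        have hit : i ∈ t := (PySem.Set.mem_ofList t i).mp hi
        have hne : i ≠ x := fun h => hx (h ▸ hit)
        rw [hcnt i]; simp [hne]
      rw [h1, ih]
      simp [List.count_eq_zero_of_not_mem hx, List.count_append]

-- the two inner dicts agree
theorem pv_dict_eq (ls : List String) :
    (PySem.Set.ofList ls).foldl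
        (fun (d : PySem.Dict String Int) i => d.insert (pvName i) (d.getD (pvName i) 0 + (List.count i ls : Int)))
        PySem.Dict.empty
      = ls.foldl (fun (d : PySem.Dict String Int) l => d.insert (pvName l) (d.getD (pvName l) 0 + 1))
        PySem.Dict.empty := by
  have hndA := PySem.Dict.nodup_keys_foldl_insert_key (ν := Int) (PySem.Set.ofList ls) pvName
      (fun d i => d.getD (pvName i) 0 + (List.count i ls : Int)) PySem.Dict.empty PySem.Dict.nodup_keys_empty
  have hndB := PySem.Dict.nodup_keys_foldl_insert_key (ν := Int) ls pvName
      (fun d l => d.getD (pvName l) 0 + 1) PySem.Dict.empty PySem.Dict.nodup_keys_empty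
  have hkA := PySem.Dict.keys_foldl_insert_key (ν := Int) (PySem.Set.ofList ls) pvName
      (fun d i => d.getD (pvName i) 0 + (List.count i ls : Int)) PySem.Dict.empty
  have hkB := PySem.Dict.keys_foldl_insert_key (ν := Int) ls pvName
      (fun d l => d.getD (pvName l) 0 + 1) PySem.Dict.empty
  rw [PySem.Dict.keys_empty, PySem.Set.update_nil_left, pv_ofList_map_ofList] at hkA
  rw [PySem.Dict.keys_empty, PySem.Set.update_nil_left] at hkB
  apply PySem.Dict.ext
  rw [PySem.Dict.items_eq_map_keys _ hndA 0, PySem.Dict.items_eq_map_keys _ hndB 0, hkA, hkB]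
  apply List.map_congr_left
  intro k _
  rw [pv_getD_foldl_insert_add (PySem.Set.ofList ls) pvName (fun i => (List.count i ls : Int)) PySem.Dict.empty k,
      pv_getD_foldl_insert_add ls pvName (fun _ => (1 : Int)) PySem.Dict.empty k,
      PySem.Dict.getD_empty, pv_count_sum]
  simp [List.countP_eq_length_filter]

-- ===== VERDICT (by name: the statement is the Claim_ definition above) =====
theorem count_spec : Claim_equal_count := by
  intro column_name detection_result _hdom _hpre
  show count column_name detection_result = count_alt column_name detection_result
  simp only [count, count_alt]
  set ls := detection_result.map (fun x => (PySem.List.pyGet? x 2).getD "") with hls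
  rw [pv_stepB_eq]
  have hB : detection_result.foldl (fun (st : PySem.Dict String Int × Int) row =>
        (st.1.insert (pvName ((PySem.List.pyGet? row 2).getD ""))
           (st.1.getD (pvName ((PySem.List.pyGet? row 2).getD "")) 0 + 1),
         st.2 + pvWt ((PySem.List.pyGet? row 2).getD ""))) (PySem.Dict.empty, 0)
      = ls.foldl (fun (st : PySem.Dict String Int × Int) i =>
        (st.1.insert (pvName i) (st.1.getD (pvName i) 0 + 1), st.2 + pvWt i)) (PySem.Dict.empty, 0) := by
    rw [hls, List.foldl_map]
  rw [hB, PySem.Dict.keys_counter, pv_stepA_eq]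
  rw [PySem.List.foldl_prod_mk
        (f := fun (d : PySem.Dict String Int) i => d.insert (pvName i) (d.getD (pvName i) 0 + (List.count i ls : Int)))
        (g := fun (t : Int) i => t + (List.count i ls : Int) * pvWt i),
      PySem.List.foldl_prod_mk
        (f := fun (d : PySem.Dict String Int) l => d.insert (pvName l) (d.getD (pvName l) 0 + 1))
        (g := fun (t : Int) l => t + pvWt l)]
  rw [pv_dict_eq ls]
  rw [PySem.List.foldl_add _ (fun i => (List.count i ls : Int) * pvWt i),
      PySem.List.foldl_add _ (fun l => pvWt l), pv_total_sum]
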